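-- pv_equiv track=rewrite | github.com/c0c3t0/CodeChef-Solutions | Strings/Volew Anxiety/vowel_anxiety.py | solve
-- ===== SOURCE A (Python) =====
-- def solve(length, text):
--     vowels = {'a', 'e', 'i', 'o', 'u'}
--     left = ''
--     right = ''
--     back = True
--
--     for char in text:
--         if back:
--             right += char
--         else:
--             left += char
--         if char in vowels:
--             back = not back
--     right = right[::-1]
--
--     return left + right
-- ===== SOURCE B (Python) =====
-- def solve(length, text):
--     # Tokenize into maximal segments each ending at a vowel (plus a trailing
--     # vowel-free remainder), then group segments by index parity: even-indexed
--     # segments form the (finally reversed) right part, odd-indexed the left part.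
--     segs = []
--     cur = []
--     for ch in text:
--         cur.append(ch)
--         if ch in 'aeiou':
--             segs.append(''.join(cur))
--             cur = []
--     if cur:
--         segs.append(''.join(cur))
--     right_parts = []
--     left_parts = []
--     for i, seg in enumerate(segs):
--         if i % 2 == 0:
--             right_parts.append(seg)
--         else:
--             left_parts.append(seg)
--     return ''.join(left_parts) + ''.join(right_parts)[::-1]
-- ===== Notes on version B (the rewrite author's own statement) =====
-- stated objective: alternative
-- what changed: Replaces A's per-character left/right boolean toggle with a two-phase decomposition: tokenize the text into maximal vowel-terminated segments (plus a vowel-free remainder), then group segments by index parity (even -> right, odd -> left) before the final join and reverse.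
import Mathlib
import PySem

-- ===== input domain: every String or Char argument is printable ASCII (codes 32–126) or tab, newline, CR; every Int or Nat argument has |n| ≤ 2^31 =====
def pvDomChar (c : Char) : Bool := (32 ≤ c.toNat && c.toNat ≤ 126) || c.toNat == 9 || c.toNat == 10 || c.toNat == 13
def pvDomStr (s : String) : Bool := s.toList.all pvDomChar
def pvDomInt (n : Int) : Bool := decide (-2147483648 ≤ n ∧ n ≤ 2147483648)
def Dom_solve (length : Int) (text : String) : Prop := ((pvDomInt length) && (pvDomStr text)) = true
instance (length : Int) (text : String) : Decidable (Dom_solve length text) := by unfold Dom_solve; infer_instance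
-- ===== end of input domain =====

-- B tokenizes the text into vowel-terminated segments and groups them by index
-- parity instead of A's per-character side toggle (objective: alternative decomposition).

-- ===== PORT A =====
-- vowels = {'a', 'e', 'i', 'o', 'u'}
def pvVowels : PySem.Set Char := PySem.Set.ofList ['a', 'e', 'i', 'o', 'u']

-- one iteration of A's for-loop; state = (left, right, back); strings are carried
-- as List Char (exact: Python `s += c` is append of one code point)
def solveStep (st : List Char × List Char × Bool) (char : Char) : List Char × List Char × Bool :=
  let (left, right, back) := st
  let (left, right) := if back then (left, right ++ [char]) else (left ++ [char], right)
  let back := if PySem.Set.contains pvVowels char then !back else back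
  (left, right, back)

def solve (length : Int) (text : String) : String :=
  let st := text.toList.foldl solveStep ([], [], true)
  -- right = right[::-1]; return left + right  (s[::-1] is List.reverse: PySem.Str.slice?_none_none_neg_one)
  String.ofList (st.1 ++ st.2.1.reverse)

-- ===== PORT B =====
-- one iteration of B's tokenizing loop; state = (segs, cur); `ch in 'aeiou'` is
-- exact as single-char membership in the list of its code points
def altTok (st : List (List Char) × List Char) (ch : Char) : List (List Char) × List Char :=
  let cur := st.2 ++ [ch]
  if ['a', 'e', 'i', 'o', 'u'].contains ch then (st.1 ++ [cur], []) else (st.1, cur)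

-- one iteration of B's grouping loop over enumerate(segs); state = (right_parts, left_parts)
def altGroup (st : List (List Char) × List (List Char)) (p : Int × List Char) :
    List (List Char) × List (List Char) :=
  if PySem.Int.mod p.1 2 == 0 then (st.1 ++ [p.2], st.2) else (st.1, st.2 ++ [p.2])

def solve_alt (length : Int) (text : String) : String :=
  let t := text.toList.foldl altTok ([], [])
  let segs := if t.2 ≠ [] then t.1 ++ [t.2] else t.1
  let g := (PySem.List.enumerate segs).foldl altGroup ([], [])
  String.ofList (g.2.flatten ++ g.1.flatten.reverse)

-- ===== PRECONDITION & SPEC =====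
def Spec_solve (length : Int) (text : String) (out : String) : Prop := out = solve_alt length text
instance (length : Int) (text : String) (out : String) : Decidable (Spec_solve length text out) := by unfold Spec_solve; infer_instance

-- ===== CLAIM (what is proved, stated in full; the proofs are below) =====
def Claim_equal_solve : Prop := ∀ (length : Int) (text : String), Dom_solve length text → Spec_solve length text (solve length text)

-- ===== LEMMAS AND PROOFS =====

-- even- and odd-indexed elements of a list (proof-side characterisation of B's grouping)
mutual
def evens {α : Type} : List α → List α
  | [] => []
  | x :: xs => x :: odds xs
def odds {α : Type} : List α → List α
  | [] => []
  | _ :: xs => evens xs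
end

theorem evens_odds_append_singleton {α : Type} (xs : List α) (y : α) :
    (evens (xs ++ [y]) = if xs.length % 2 = 0 then evens xs ++ [y] else evens xs)
    ∧ (odds (xs ++ [y]) = if xs.length % 2 = 0 then odds xs else odds xs ++ [y]) := by
  induction xs with
  | nil => simp [evens, odds]
  | cons x xs ih =>
    have hlen : (x :: xs).length % 2 = 0 ↔ ¬ (xs.length % 2 = 0) := by
      simp [List.length_cons]; omega
    constructor
    · show x :: odds (xs ++ [y]) = _
      by_cases h : xs.length % 2 = 0
      · have h2 : (xs.length + 1) % 2 = 1 := by omega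
        simp [evens, ih.2, h, h2, hlen.symm]
      · have h2 : (xs.length + 1) % 2 = 0 := by omega
        simp [evens, ih.2, h, h2, hlen.symm]
    · show evens (xs ++ [y]) = _
      by_cases h : xs.length % 2 = 0
      · have h2 : (xs.length + 1) % 2 = 1 := by omega
        simp [odds, ih.1, h, h2, hlen.symm]
      · have h2 : (xs.length + 1) % 2 = 0 := by omega
        simp [odds, ih.1, h, h2, hlen.symm]

theorem evens_append_singleton {α : Type} (xs : List α) (y : α) :
    evens (xs ++ [y]) = if xs.length % 2 = 0 then evens xs ++ [y] else evens xs :=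
  (evens_odds_append_singleton xs y).1

theorem odds_append_singleton {α : Type} (xs : List α) (y : α) :
    odds (xs ++ [y]) = if xs.length % 2 = 0 then odds xs else odds xs ++ [y] :=
  (evens_odds_append_singleton xs y).2

-- A's loop state as a function of B's tokenizer state
def Aof (segs : List (List Char)) (cur : List Char) : List Char × List Char × Bool :=
  if segs.length % 2 = 0 then
    ((odds segs).flatten, (evens segs).flatten ++ cur, true)
  else
    ((odds segs).flatten ++ cur, (evens segs).flatten, false)

theorem loop_rel (l : List Char) :
    ∀ (segs : List (List Char)) (cur : List Char),
    l.foldl solveStep (Aof segs cur)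
      = Aof (l.foldl altTok (segs, cur)).1 (l.foldl altTok (segs, cur)).2 := by
  induction l with
  | nil => intro segs cur; rfl
  | cons ch l ih =>
    intro segs cur
    have hv : PySem.Set.contains pvVowels ch = ['a', 'e', 'i', 'o', 'u'].contains ch := by
      simp [pvVowels]
    by_cases hm : ch ∈ (['a', 'e', 'i', 'o', 'u'] : List Char)
    · have hstep : solveStep (Aof segs cur) ch = Aof (segs ++ [cur ++ [ch]]) [] := by
        by_cases h0 : segs.length % 2 = 0
        · have hA : Aof segs cur = ((odds segs).flatten, (evens segs).flatten ++ cur, true) := by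
            simp [Aof, h0]
          rw [hA]
          simp [solveStep, hv, hm, pvVowels, PySem.Set.mem_ofList, Aof, evens_append_singleton, odds_append_singleton, h0,
            List.length_append, Nat.add_mod]
        · have hA : Aof segs cur = ((odds segs).flatten ++ cur, (evens segs).flatten, false) := by
            simp [Aof, h0]
          rw [hA]
          have h1 : segs.length % 2 = 1 := by omega
          simp [solveStep, hv, hm, pvVowels, PySem.Set.mem_ofList, Aof, evens_append_singleton, odds_append_singleton, h0, h1,
            List.length_append, Nat.add_mod]
      have htok : altTok (segs, cur) ch = (segs ++ [cur ++ [ch]], []) := by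
        simp [altTok, hm]
      simp only [List.foldl_cons, hstep, htok, ih]
    · have hstep : solveStep (Aof segs cur) ch = Aof segs (cur ++ [ch]) := by
        by_cases h0 : segs.length % 2 = 0
        · have hA : Aof segs cur = ((odds segs).flatten, (evens segs).flatten ++ cur, true) := by
            simp [Aof, h0]
          rw [hA]; simp [solveStep, hv, hm, pvVowels, PySem.Set.mem_ofList, Aof, h0]
        · have hA : Aof segs cur = ((odds segs).flatten ++ cur, (evens segs).flatten, false) := by
            simp [Aof, h0]
          rw [hA]; simp [solveStep, hv, hm, pvVowels, PySem.Set.mem_ofList, Aof, h0]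
      have htok : altTok (segs, cur) ch = (segs, cur ++ [ch]) := by
        simp [altTok, hm]
      simp only [List.foldl_cons, hstep, htok, ih]

-- B's grouping loop computes exactly (evens, odds) of the segment list
theorem group_eval (xs : List (List Char)) :
    ∀ (n : Nat) (r l : List (List Char)),
    (PySem.List.enumerate xs (n : Int)).foldl altGroup (r, l)
      = if n % 2 = 0 then (r ++ evens xs, l ++ odds xs) else (r ++ odds xs, l ++ evens xs) := by
  induction xs with
  | nil => intro n r l; by_cases h : n % 2 = 0 <;> simp [PySem.List.enumerate_nil, evens, odds, h]
  | cons x xs ih =>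
    intro n r l
    have hcast : ((n : Int) + 1) = ((n + 1 : Nat) : Int) := by push_cast; ring
    have hmod : PySem.Int.mod (n : Int) 2 = ((n % 2 : Nat) : Int) := by
      simp [PySem.Int.mod, Int.fmod_eq_emod]
    rw [PySem.List.enumerate_cons, List.foldl_cons, hcast]
    by_cases h : n % 2 = 0
    · have hg : altGroup (r, l) ((n : Int), x) = (r ++ [x], l) := by
        simp [altGroup, hmod, h] <;> omega
      have hn1 : ¬ ((n + 1) % 2 = 0) := by omega
      rw [hg, ih (n + 1) (r ++ [x]) l]
      simp [h, hn1, evens, odds]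
    · have h1 : n % 2 = 1 := by omega
      have hg : altGroup (r, l) ((n : Int), x) = (r, l ++ [x]) := by
        simp [altGroup, hmod, h1] <;> omega
      have hn1 : (n + 1) % 2 = 0 := by omega
      rw [hg, ih (n + 1) r (l ++ [x])]
      simp [h, hn1, evens, odds]

-- ===== VERDICT (by name: the statement is the Claim_ definition above) =====
theorem solve_spec : Claim_equal_solve := by
  intro length text _
  show solve length text = solve_alt length text
  unfold solve solve_alt
  simp only []
  have hrel := loop_rel text.toList [] []
  have h0 : Aof [] [] = ([], [], true) := by simp [Aof, evens, odds]
  rw [h0] at hrel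
  set t := text.toList.foldl altTok ([], []) with ht
  set segs := if t.2 ≠ [] then t.1 ++ [t.2] else t.1 with hsegs
  have hg := group_eval segs 0 [] []
  simp only [Nat.zero_mod, if_pos (by rfl : (0 : Nat) % 2 = 0), List.nil_append, Nat.cast_zero] at hg
  rw [hrel, hg]
  by_cases hc : t.2 = []
  · have hs : segs = t.1 := by simp [hsegs, hc]
    by_cases hp : t.1.length % 2 = 0
    · simp [Aof, hp, hc, hs]
    · simp [Aof, hp, hc, hs]
  · have hs : segs = t.1 ++ [t.2] := by simp [hsegs, hc]
    by_cases hp : t.1.length % 2 = 0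
    · simp [Aof, hp, hs, evens_append_singleton, odds_append_singleton]
    · simp [Aof, hp, hs, evens_append_singleton, odds_append_singleton]
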